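-- pv_equiv track=rewrite | github.com/joanayao/pic | Convergence.py | subtract
-- ===== SOURCE A (Python) =====
-- def subtract(x1, y1, x2, y2):
--     x, y = [], []
--     for pos1, value in enumerate(x1):
--         if value in x2:
--             pos2 = x2.index(value)
--             dif = y1[pos1] - y2[pos2]
--             x.append(value)
--             y.append(dif)
--
--     return [x,y]
-- ===== SOURCE B (Python) =====
-- def subtract(x1, y1, x2, y2):
--     # Sort-merge join: value-sort both sides, collapse x2 into (value, smallest index)
--     # runs, merge the two sorted runs with two pointers, then sort the matches back
--     # into x1 order.  O((n+m) log(n+m)) instead of A's O(n*m) scans.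
--     byval2 = sorted(range(len(x2)), key=lambda j: x2[j])
--     runs = []  # (value, smallest x2-index holding it), strictly increasing by value
--     for j in byval2:
--         v = x2[j]
--         if runs and runs[-1][0] == v:
--             if j < runs[-1][1]:
--                 runs[-1] = (v, j)
--         else:
--             runs.append((v, j))
--     order1 = sorted(range(len(x1)), key=lambda i: x1[i])
--     matches = []
--     p = 0
--     for i in order1:
--         v = x1[i]
--         while p < len(runs) and runs[p][0] < v:
--             p += 1
--         if p < len(runs) and runs[p][0] == v:
--             matches.append((i, v, y1[i] - y2[runs[p][1]]))
--     matches.sort(key=lambda m: m[0])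
--     return [[m[1] for m in matches], [m[2] for m in matches]]
-- ===== Notes on version B (the rewrite author's own statement) =====
-- stated objective: faster
-- what changed: B replaces A's nested membership/index scans with a sort-merge join: value-sort the indices of both series, collapse x2 into (value, smallest index) runs, merge the two sorted runs with two pointers, and sort the matches back into x1 order.
import Mathlib
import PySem

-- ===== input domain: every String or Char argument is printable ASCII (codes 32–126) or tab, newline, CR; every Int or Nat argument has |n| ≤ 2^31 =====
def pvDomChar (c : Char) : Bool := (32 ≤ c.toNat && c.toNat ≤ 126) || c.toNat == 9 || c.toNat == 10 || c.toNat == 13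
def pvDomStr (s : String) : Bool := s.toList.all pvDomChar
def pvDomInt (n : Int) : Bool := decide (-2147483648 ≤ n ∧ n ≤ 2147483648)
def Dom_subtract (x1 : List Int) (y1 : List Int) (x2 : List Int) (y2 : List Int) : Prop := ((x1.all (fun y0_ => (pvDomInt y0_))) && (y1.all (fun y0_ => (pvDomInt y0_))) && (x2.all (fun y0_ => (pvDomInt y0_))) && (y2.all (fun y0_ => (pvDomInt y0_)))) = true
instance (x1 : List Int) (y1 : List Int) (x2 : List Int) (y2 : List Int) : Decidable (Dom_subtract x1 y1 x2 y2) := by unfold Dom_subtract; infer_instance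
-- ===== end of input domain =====

-- B replaces A's per-element 'value in x2' / 'x2.index(value)' scans with a sort-merge join
-- (value-sort both sides, two-pointer merge, re-sort matches into x1 order); measured faster.

-- ===== PORT A =====
-- loop body of A: for pos1, value in enumerate(x1): if value in x2: append(value), append(y1[pos1]-y2[x2.index(value)])
def subA (x2 y1 y2 : List Int) (st : List Int × List Int) (p : Int × Int) : List Int × List Int :=
  if p.2 ∈ x2 then
    (st.1 ++ [p.2],
     st.2 ++ [PySem.List.pyGetD y1 p.1 0 -
              PySem.List.pyGetD y2 (((PySem.List.index? x2 p.2).getD 0 : Nat) : Int) 0])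
  else st

def subtract (x1 : List Int) (y1 : List Int) (x2 : List Int) (y2 : List Int) : List (List Int) :=
  let st := (PySem.List.enumerate x1).foldl (subA x2 y1 y2) ([], [])
  [st.1, st.2]

-- ===== PORT B =====
-- loop body of B: for j in byval2: v = x2[j]; if runs and runs[-1][0] == v: (if j < runs[-1][1]: runs[-1] = (v, j)) else: runs.append((v, j))
def runsStep (x2 : List Int) (runs : List (Int × Int)) (j : Int) : List (Int × Int) :=
  let v := PySem.List.pyGetD x2 j 0
  match runs.getLast? with
  | some r =>
      if r.1 = v then
        if j < r.2 then runs.dropLast ++ [(v, j)] else runs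
      else runs ++ [(v, j)]
  | none => runs ++ [(v, j)]

-- while p < len(runs) and runs[p][0] < v: p += 1
def advance (runs : List (Int × Int)) (v : Int) (p : Nat) : Nat :=
  if h : p < runs.length ∧ (runs.getD p (0, 0)).1 < v then advance runs v (p + 1) else p
termination_by runs.length - p
decreasing_by omega

-- loop body of B: for i in order1: v = x1[i]; p = advance; if p < len(runs) and runs[p][0] == v: matches.append((i, v, y1[i]-y2[runs[p][1]]))
def mergeStep (x1 y1 y2 : List Int) (runs : List (Int × Int))
    (st : Nat × List (Int × Int × Int)) (i : Int) : Nat × List (Int × Int × Int) :=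
  let v := PySem.List.pyGetD x1 i 0
  let p := advance runs v st.1
  if p < runs.length ∧ (runs.getD p (0, 0)).1 = v then
    (p, st.2 ++ [(i, v, PySem.List.pyGetD y1 i 0 - PySem.List.pyGetD y2 (runs.getD p (0, 0)).2 0)])
  else (p, st.2)

def subtract_alt (x1 : List Int) (y1 : List Int) (x2 : List Int) (y2 : List Int) : List (List Int) :=
  let byval2 := PySem.List.sorted (PySem.List.pyRange 0 (PySem.List.len x2)) (fun j => PySem.List.pyGetD x2 j 0)
  let runs := byval2.foldl (runsStep x2) []
  let order1 := PySem.List.sorted (PySem.List.pyRange 0 (PySem.List.len x1)) (fun i => PySem.List.pyGetD x1 i 0)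
  let st := order1.foldl (mergeStep x1 y1 y2 runs) (0, [])
  let ms := PySem.List.sorted st.2 (fun m => m.1)
  [ms.map (fun m => m.2.1), ms.map (fun m => m.2.2)]

-- ===== PRECONDITION & SPEC =====
-- Exactly the inputs on which the Python A returns (no IndexError): every x1-position whose value
-- occurs in x2 has a y1 entry, and every matched value's first occurrence in x2 lies within y2.
def Pre_subtract (x1 : List Int) (y1 : List Int) (x2 : List Int) (y2 : List Int) : Prop :=
  (∀ i < x1.length, x1.getD i 0 ∈ x2 → i < y1.length) ∧
  (∀ v ∈ x1, v ∈ x2 → v ∈ x2.take y2.length)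
instance (x1 : List Int) (y1 : List Int) (x2 : List Int) (y2 : List Int) : Decidable (Pre_subtract x1 y1 x2 y2) := by unfold Pre_subtract; infer_instance

def pvWitness_subtract : List Int × List Int × List Int × List Int := ([1, 2, 5], [10, 20, 30], [2, 1], [7, 8])

def Spec_subtract (x1 : List Int) (y1 : List Int) (x2 : List Int) (y2 : List Int) (out : List (List Int)) : Prop := out = subtract_alt x1 y1 x2 y2
instance (x1 : List Int) (y1 : List Int) (x2 : List Int) (y2 : List Int) (out : List (List Int)) : Decidable (Spec_subtract x1 y1 x2 y2 out) := by unfold Spec_subtract; infer_instance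

-- ===== CLAIM (what is proved, stated in full; the proofs are below) =====
def Claim_equal_subtract : Prop := ∀ (x1 : List Int) (y1 : List Int) (x2 : List Int) (y2 : List Int), Dom_subtract x1 y1 x2 y2 → Pre_subtract x1 y1 x2 y2 → Spec_subtract x1 y1 x2 y2 (subtract x1 y1 x2 y2)

-- ===== LEMMAS AND PROOFS =====

-- the common canonical value: matched enumerate-pairs of x1 in order, as (index, value, diff) triples
def canonA (x1 y1 x2 y2 : List Int) : List (Int × Int × Int) :=
  (PySem.List.enumerate x1).filterMap (fun p =>
    if p.2 ∈ x2 then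
      some (p.1, p.2, PySem.List.pyGetD y1 p.1 0 -
                      PySem.List.pyGetD y2 (((PySem.List.index? x2 p.2).getD 0 : Nat) : Int) 0)
    else none)

lemma filterMap_ite_eq_filter_map {α β : Type} (l : List α) (p : α → Prop) [DecidablePred p] (f : α → β) :
    l.filterMap (fun a => if p a then some (f a) else none) = (l.filter (fun a => decide (p a))).map f := by
  induction l with
  | nil => rfl
  | cons a t ih => by_cases h : p a <;> simp [h, ih]

-- A's fold = the canonical list, componentwise
lemma subtract_eq_canon (x1 y1 x2 y2 : List Int) :
    subtract x1 y1 x2 y2 =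
      [(canonA x1 y1 x2 y2).map (fun m => m.2.1), (canonA x1 y1 x2 y2).map (fun m => m.2.2)] := by
  have hsplit : subA x2 y1 y2 = fun (s : List Int × List Int) (e : Int × Int) =>
      ((fun (a : List Int) (e : Int × Int) => if e.2 ∈ x2 then a ++ [e.2] else a) s.1 e,
       (fun (a : List Int) (e : Int × Int) => if e.2 ∈ x2 then
          a ++ [PySem.List.pyGetD y1 e.1 0 -
                PySem.List.pyGetD y2 (((PySem.List.index? x2 e.2).getD 0 : Nat) : Int) 0] else a) s.2 e) := by
    funext s e
    simp only [subA]
    split <;> rfl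
  have key : (PySem.List.enumerate x1).foldl (subA x2 y1 y2) ([], []) =
      (((PySem.List.enumerate x1).filter (fun e => decide (e.2 ∈ x2))).map (fun e : Int × Int => e.2),
       ((PySem.List.enumerate x1).filter (fun e => decide (e.2 ∈ x2))).map
         (fun e : Int × Int => PySem.List.pyGetD y1 e.1 0 -
            PySem.List.pyGetD y2 (((PySem.List.index? x2 e.2).getD 0 : Nat) : Int) 0)) := by
    rw [hsplit, PySem.List.foldl_prod_mk
          (f := fun (a : List Int) (e : Int × Int) => if e.2 ∈ x2 then a ++ [e.2] else a)
          (g := fun (a : List Int) (e : Int × Int) => if e.2 ∈ x2 then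
             a ++ [PySem.List.pyGetD y1 e.1 0 -
                   PySem.List.pyGetD y2 (((PySem.List.index? x2 e.2).getD 0 : Nat) : Int) 0] else a),
        PySem.List.foldl_append_ite (p := fun e : Int × Int => e.2 ∈ x2) (f := fun e : Int × Int => e.2),
        PySem.List.foldl_append_ite (p := fun e : Int × Int => e.2 ∈ x2)]
    simp
  simp only [subtract, canonA, key, filterMap_ite_eq_filter_map, List.map_map]
  simp

-- what the while loop computes: the first pointer ≥ p whose run key is not < v
lemma advance_spec (runs : List (Int × Int)) (v : Int) : ∀ (p : Nat), p ≤ runs.length →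
    p ≤ advance runs v p ∧ advance runs v p ≤ runs.length ∧
    (∀ q, p ≤ q → q < advance runs v p → (runs.getD q (0, 0)).1 < v) ∧
    (advance runs v p < runs.length → ¬ (runs.getD (advance runs v p) (0, 0)).1 < v) := by
  intro p
  induction p using advance.induct (runs := runs) (v := v) with
  | case1 p h ih =>
    intro _
    rw [advance, dif_pos h]
    obtain ⟨h1, h2, h3, h4⟩ := ih h.1
    refine ⟨by omega, h2, ?_, h4⟩
    intro q hq hq2
    rcases Nat.eq_or_lt_of_le hq with rfl | hlt
    · exact h.2
    · exact h3 q hlt hq2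
  | case2 p h =>
    intro hp
    rw [advance, dif_neg h]
    refine ⟨le_refl _, hp, fun q hq hq2 => absurd hq (by omega), fun hlt => ?_⟩
    intro hcon; exact h ⟨hlt, hcon⟩

-- the runs fold invariant: strictly increasing keys, keys = values seen, indices minimal
lemma runs_inv (x2 : List Int) :
    ∀ (rest done : List Int) (runs : List (Int × Int)),
      rest.Pairwise (fun a b => PySem.List.pyGetD x2 a 0 ≤ PySem.List.pyGetD x2 b 0) →
      (runs.map Prod.fst).Pairwise (· < ·) →
      (∀ r ∈ runs, ∀ j ∈ rest, r.1 ≤ PySem.List.pyGetD x2 j 0) →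
      (∀ v : Int, v ∈ runs.map Prod.fst ↔ v ∈ done.map (fun j => PySem.List.pyGetD x2 j 0)) →
      (∀ r ∈ runs, r.2 ∈ done ∧ PySem.List.pyGetD x2 r.2 0 = r.1 ∧
        ∀ j ∈ done, PySem.List.pyGetD x2 j 0 = r.1 → r.2 ≤ j) →
      ((rest.foldl (runsStep x2) runs).map Prod.fst).Pairwise (· < ·) ∧
      (∀ v : Int, v ∈ (rest.foldl (runsStep x2) runs).map Prod.fst ↔
        v ∈ (done ++ rest).map (fun j => PySem.List.pyGetD x2 j 0)) ∧
      (∀ r ∈ rest.foldl (runsStep x2) runs, r.2 ∈ done ++ rest ∧ PySem.List.pyGetD x2 r.2 0 = r.1 ∧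
        ∀ j ∈ done ++ rest, PySem.List.pyGetD x2 j 0 = r.1 → r.2 ≤ j) := by
  intro rest
  induction rest with
  | nil =>
    intro done runs _ h1 _ h3 h4
    simp only [List.foldl_nil, List.append_nil]
    exact ⟨h1, h3, h4⟩
  | cons j t ih =>
    intro done runs hsort h1 h2 h3 h4
    rw [List.foldl_cons]
    have hsort' := hsort.of_cons
    have hhead : ∀ a ∈ t, PySem.List.pyGetD x2 j 0 ≤ PySem.List.pyGetD x2 a 0 :=
      fun a ha => (List.pairwise_cons.mp hsort).1 a ha
    have hkeyle : ∀ s ∈ runs, s.1 ≤ PySem.List.pyGetD x2 j 0 :=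
      fun s hs => h2 s hs j (List.mem_cons_self)
    have hdc : done ++ j :: t = (done ++ [j]) ++ t := by simp
    -- establish the five hypotheses of ih for the stepped state, in each case of runsStep
    suffices hstep :
        ((runsStep x2 runs j).map Prod.fst).Pairwise (· < ·) ∧
        (∀ r ∈ runsStep x2 runs j, ∀ a ∈ t, r.1 ≤ PySem.List.pyGetD x2 a 0) ∧
        (∀ v : Int, v ∈ (runsStep x2 runs j).map Prod.fst ↔
          v ∈ (done ++ [j]).map (fun a => PySem.List.pyGetD x2 a 0)) ∧
        (∀ r ∈ runsStep x2 runs j, r.2 ∈ done ++ [j] ∧ PySem.List.pyGetD x2 r.2 0 = r.1 ∧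
          ∀ a ∈ done ++ [j], PySem.List.pyGetD x2 a 0 = r.1 → r.2 ≤ a) by
      obtain ⟨c1, c2, c3, c4⟩ := hstep
      rw [hdc]
      exact ih (done ++ [j]) (runsStep x2 runs j) hsort' c1 c2 c3 c4
    rcases hlast : runs.getLast? with _ | r
    · -- runs = []
      have hnil : runs = [] := List.getLast?_eq_none_iff.mp hlast
      subst hnil
      have hstep : runsStep x2 [] j = [(PySem.List.pyGetD x2 j 0, j)] := by simp [runsStep]
      rw [hstep]
      have hdone : ∀ v : Int, v ∉ done.map (fun a => PySem.List.pyGetD x2 a 0) :=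
        fun v hv => by simpa using (h3 v).mpr hv
      refine ⟨by simp, by simpa using hhead, ?_, ?_⟩
      · intro v
        constructor
        · intro hv; simp at hv; simp [hv]
        · intro hv
          simp only [List.map_append, List.mem_append] at hv
          rcases hv with hv | hv
          · exact absurd hv (hdone v)
          · simp at hv; simp [hv]
      · intro r hr
        simp only [List.mem_singleton] at hr
        subst hr
        refine ⟨by simp, rfl, ?_⟩
        intro a ha hga
        rcases List.mem_append.mp ha with ha | ha
        · exact absurd (List.mem_map.mpr ⟨a, ha, hga⟩) (hdone _)
        · simp at ha; omega
    · -- runs = init ++ [r]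
      obtain ⟨init, rfl⟩ := List.getLast?_eq_some_iff.mp hlast
      have hinitlt : ∀ s ∈ init, s.1 < r.1 := by
        intro s hs
        have := (List.pairwise_append.mp (by simpa [List.map_append] using h1)).2.2
        exact this s.1 (List.mem_map.mpr ⟨s, hs, rfl⟩) r.1 (by simp)
      have hrle : r.1 ≤ PySem.List.pyGetD x2 j 0 := hkeyle r (by simp)
      by_cases heq : r.1 = PySem.List.pyGetD x2 j 0
      · by_cases hj : j < r.2
        · -- replace the last run by (v, j)
          have hstep : runsStep x2 (init ++ [r]) j = init ++ [(PySem.List.pyGetD x2 j 0, j)] := by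
            simp [runsStep, heq, hj]
          rw [hstep]
          have hkeys : (init ++ [(PySem.List.pyGetD x2 j 0, j)]).map Prod.fst
              = (init ++ [r]).map Prod.fst := by simp [heq]
          have hrmin := h4 r (by simp)
          refine ⟨by rw [hkeys]; exact h1, ?_, ?_, ?_⟩
          · intro s hs a ha
            rcases List.mem_append.mp hs with hs | hs
            · exact h2 s (by simp [hs]) a (by simp [ha])
            · simp at hs; subst hs; exact hhead a ha
          · intro v
            rw [hkeys]
            constructor
            · intro hv
              rcases List.mem_map.mp ((h3 v).mp hv) with ⟨a, ha, rfl⟩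
              exact List.mem_map.mpr ⟨a, by simp [ha], rfl⟩
            · intro hv
              rcases List.mem_map.mp hv with ⟨a, ha, rfl⟩
              rcases List.mem_append.mp ha with ha | ha
              · exact (h3 _).mpr (List.mem_map.mpr ⟨a, ha, rfl⟩)
              · simp at ha; subst ha
                rw [← heq]; simp
          · intro s hs
            rcases List.mem_append.mp hs with hs | hs
            · obtain ⟨hd, hgv, hmin⟩ := h4 s (by simp [hs])
              refine ⟨by simp [hd], hgv, ?_⟩
              intro a ha hga
              rcases List.mem_append.mp ha with ha | ha
              · exact hmin a ha hga
              · exfalso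
                have h5 := hinitlt s hs
                simp only [List.mem_singleton] at ha
                rw [ha] at hga
                omega
            · simp only [List.mem_singleton] at hs; subst hs
              refine ⟨by simp, rfl, ?_⟩
              intro a ha hga
              rcases List.mem_append.mp ha with ha | ha
              · have := hrmin.2.2 a ha (by rw [hga]; exact heq.symm)
                omega
              · simp only [List.mem_singleton] at ha; omega
        · -- keep runs unchanged
          have hstep : runsStep x2 (init ++ [r]) j = init ++ [r] := by
            simp [runsStep, heq, hj]
          rw [hstep]
          refine ⟨h1, fun s hs a ha => h2 s hs a (by simp [ha]), ?_, ?_⟩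
          · intro v
            constructor
            · intro hv
              rcases List.mem_map.mp ((h3 v).mp hv) with ⟨a, ha, rfl⟩
              exact List.mem_map.mpr ⟨a, by simp [ha], rfl⟩
            · intro hv
              rcases List.mem_map.mp hv with ⟨a, ha, rfl⟩
              rcases List.mem_append.mp ha with ha | ha
              · exact (h3 _).mpr (List.mem_map.mpr ⟨a, ha, rfl⟩)
              · simp at ha; subst ha
                rw [← heq]
                exact List.mem_map.mpr ⟨r, by simp, rfl⟩
          · intro s hs
            obtain ⟨hd, hgv, hmin⟩ := h4 s hs
            refine ⟨by simp [hd], hgv, ?_⟩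
            intro a ha hga
            rcases List.mem_append.mp ha with ha | ha
            · exact hmin a ha hga
            · simp only [List.mem_singleton] at ha
              rw [ha] at hga
              rcases List.mem_append.mp hs with hs2 | hs2
              · exfalso; have h5 := hinitlt s hs2; omega
              · simp only [List.mem_singleton] at hs2; subst hs2; omega
      · -- append a new run (v, j)
        have hstep : runsStep x2 (init ++ [r]) j = (init ++ [r]) ++ [(PySem.List.pyGetD x2 j 0, j)] := by
          simp [runsStep, heq]
        rw [hstep]
        have hallkeys : ∀ s ∈ init ++ [r], s.1 < PySem.List.pyGetD x2 j 0 := by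
          intro s hs
          rcases List.mem_append.mp hs with hs | hs
          · exact (hinitlt s hs).trans (lt_of_le_of_ne hrle heq)
          · simp at hs; subst hs; exact lt_of_le_of_ne hrle heq
        refine ⟨?_, ?_, ?_, ?_⟩
        · rw [List.map_append]
          refine List.pairwise_append.mpr ⟨h1, by simp, ?_⟩
          intro a ha b hb
          simp only [List.map_cons, List.map_nil, List.mem_singleton] at hb
          subst hb
          rcases List.mem_map.mp ha with ⟨s, hs, rfl⟩
          exact hallkeys s hs
        · intro s hs a ha
          rcases List.mem_append.mp hs with hs | hs
          · exact h2 s hs a (by simp [ha])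
          · simp at hs; subst hs; exact hhead a ha
        · intro v
          rw [List.map_append, List.mem_append]
          constructor
          · intro hv
            rcases hv with hv | hv
            · rcases List.mem_map.mp ((h3 v).mp hv) with ⟨a, ha, rfl⟩
              exact List.mem_map.mpr ⟨a, by simp [ha], rfl⟩
            · simp at hv; subst hv
              exact List.mem_map.mpr ⟨j, by simp, rfl⟩
          · intro hv
            rcases List.mem_map.mp hv with ⟨a, ha, rfl⟩
            rcases List.mem_append.mp ha with ha | ha
            · exact Or.inl ((h3 _).mpr (List.mem_map.mpr ⟨a, ha, rfl⟩))
            · simp at ha; subst ha; simp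
        · intro s hs
          rcases List.mem_append.mp hs with hs | hs
          · obtain ⟨hd, hgv, hmin⟩ := h4 s hs
            refine ⟨by simp [hd], hgv, ?_⟩
            intro a ha hga
            rcases List.mem_append.mp ha with ha | ha
            · exact hmin a ha hga
            · exfalso
              have h5 := hallkeys s hs
              simp only [List.mem_singleton] at ha
              rw [ha] at hga
              omega
          · simp only [List.mem_singleton] at hs; subst hs
            refine ⟨by simp, rfl, ?_⟩
            intro a ha hga
            rcases List.mem_append.mp ha with ha | ha
            · exfalso
              have hv2 : PySem.List.pyGetD x2 j 0 ∈ (init ++ [r]).map Prod.fst :=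
                (h3 _).mpr (List.mem_map.mpr ⟨a, ha, hga⟩)
              rcases List.mem_map.mp hv2 with ⟨s, hs2, hks⟩
              have h5 := hallkeys s hs2
              omega
            · simp only [List.mem_singleton] at ha; omega

-- per-index contribution of B's merge loop
def phi (x1 y1 y2 : List Int) (runs : List (Int × Int)) (i : Int) : Option (Int × Int × Int) :=
  (runs.find? (fun r => r.1 == PySem.List.pyGetD x1 i 0)).map
    (fun r => (i, PySem.List.pyGetD x1 i 0, PySem.List.pyGetD y1 i 0 - PySem.List.pyGetD y2 r.2 0))

-- the two-pointer merge collects exactly the per-index contributions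
lemma merge_fold (x1 y1 y2 : List Int) (runs : List (Int × Int))
    (hruns : (runs.map Prod.fst).Pairwise (· < ·)) :
    ∀ (s : List Int) (p : Nat) (acc : List (Int × Int × Int)),
      s.Pairwise (fun a b => PySem.List.pyGetD x1 a 0 ≤ PySem.List.pyGetD x1 b 0) →
      p ≤ runs.length →
      (∀ q, q < p → ∀ j ∈ s, (runs.getD q (0, 0)).1 < PySem.List.pyGetD x1 j 0) →
      (s.foldl (mergeStep x1 y1 y2 runs) (p, acc)).2 = acc ++ s.filterMap (phi x1 y1 y2 runs) := by
  have hmono : ∀ a b : Nat, a ≤ b → (hb : b < runs.length) → (runs.getD a (0,0)).1 ≤ (runs.getD b (0,0)).1 := by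
    intro a b hab hb
    rcases Nat.eq_or_lt_of_le hab with rfl | hlt
    · exact le_refl _
    · have := (List.pairwise_iff_getElem.mp hruns) a b (by simpa using lt_of_le_of_lt hab hb)
        (by simpa using hb) hlt
      simp only [List.getElem_map] at this
      rw [List.getD_eq_getElem _ _ (lt_of_lt_of_le hlt (le_of_lt hb)), List.getD_eq_getElem _ _ hb]
      exact le_of_lt (by simpa using this)
  intro s
  induction s with
  | nil => intro p acc _ _ _; simp
  | cons i t ih =>
    intro p acc hsort hp hlow
    rw [List.foldl_cons]
    have hhead : ∀ a ∈ t, PySem.List.pyGetD x1 i 0 ≤ PySem.List.pyGetD x1 a 0 :=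
      fun a ha => (List.pairwise_cons.mp hsort).1 a ha
    obtain ⟨ha1, ha2, ha3, ha4⟩ := advance_spec runs (PySem.List.pyGetD x1 i 0) p hp
    set v := PySem.List.pyGetD x1 i 0 with hv
    set p' := advance runs v p with hp'
    -- every pointer position below p' has key < v
    have hbelow : ∀ q, q < p' → (runs.getD q (0,0)).1 < v := by
      intro q hq
      by_cases hqp : q < p
      · exact hlow q hqp i (List.mem_cons_self)
      · exact ha3 q (by omega) hq
    have hlow' : ∀ q, q < p' → ∀ a ∈ t, (runs.getD q (0,0)).1 < PySem.List.pyGetD x1 a 0 :=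
      fun q hq a ha => lt_of_lt_of_le (hbelow q hq) (hhead a ha)
    by_cases hit : p' < runs.length ∧ (runs.getD p' (0,0)).1 = v
    · -- the pointer found the run for v
      have hfind : runs.find? (fun r => r.1 == v) = some (runs.getD p' (0,0)) := by
        rw [List.find?_eq_some_iff_getElem]
        refine ⟨by simpa using hit.2, p', hit.1, (List.getD_eq_getElem _ _ hit.1).symm, ?_⟩
        intro q hq
        have := hbelow q hq
        rw [List.getD_eq_getElem _ _ (lt_trans hq hit.1)] at this
        simp only [Bool.not_eq_true', beq_eq_false_iff_ne, ne_eq]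
        omega
      have hstep : mergeStep x1 y1 y2 runs (p, acc) i =
          (p', acc ++ [(i, v, PySem.List.pyGetD y1 i 0 - PySem.List.pyGetD y2 (runs.getD p' (0,0)).2 0)]) := by
        simp only [mergeStep]
        rw [← hv, ← hp', if_pos hit]
      rw [hstep, ih p' _ (hsort.of_cons) ha2 hlow']
      have hphi : phi x1 y1 y2 runs i =
          some (i, v, PySem.List.pyGetD y1 i 0 - PySem.List.pyGetD y2 (runs.getD p' (0,0)).2 0) := by
        simp only [phi, ← hv, hfind, Option.map_some]
      rw [List.filterMap_cons, hphi]
      simp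
    · -- no run for v exists
      have hfind : runs.find? (fun r => r.1 == v) = none := by
        rw [List.find?_eq_none]
        intro r hr
        obtain ⟨q, hq, hrq⟩ := List.mem_iff_getElem.mp hr
        have hrq' : runs.getD q (0,0) = r := by rw [List.getD_eq_getElem _ _ hq, hrq]
        simp only [beq_iff_eq]
        by_cases hqp : q < p'
        · have := hbelow q hqp; rw [hrq'] at this; omega
        · have hple : p' < runs.length := lt_of_le_of_lt (le_of_not_gt (by omega)) hq
          have h1 : ¬ (runs.getD p' (0,0)).1 < v := ha4 hple
          have h2 : (runs.getD p' (0,0)).1 ≠ v := fun hc => hit ⟨hple, hc⟩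
          have h3 := hmono p' q (by omega) hq
          rw [hrq'] at h3
          omega
      have hstep : mergeStep x1 y1 y2 runs (p, acc) i = (p', acc) := by
        simp only [mergeStep]
        rw [← hv, ← hp', if_neg hit]
      rw [hstep, ih p' _ (hsort.of_cons) ha2 hlow']
      have hphi : phi x1 y1 y2 runs i = none := by
        simp only [phi, ← hv, hfind, Option.map_none]
      rw [List.filterMap_cons, hphi]

-- B's whole pipeline = the canonical list, componentwise
lemma alt_eq_canon (x1 y1 x2 y2 : List Int) :
    subtract_alt x1 y1 x2 y2 =
      [(canonA x1 y1 x2 y2).map (fun m => m.2.1), (canonA x1 y1 x2 y2).map (fun m => m.2.2)] := by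
  have hpair2 := PySem.List.sorted_pairwise (PySem.List.pyRange 0 (PySem.List.len x2))
      (fun j => PySem.List.pyGetD x2 j 0)
  have hperm2 := PySem.List.sorted_perm (PySem.List.pyRange 0 (PySem.List.len x2))
      (fun j => PySem.List.pyGetD x2 j 0) false
  set byval2 := PySem.List.sorted (PySem.List.pyRange 0 (PySem.List.len x2))
      (fun j => PySem.List.pyGetD x2 j 0) with hbv
  set runs0 := byval2.foldl (runsStep x2) [] with hr0
  obtain ⟨hD1, hD2, hD3⟩ := runs_inv x2 byval2 [] [] hpair2 (by simp) (by simp) (by simp) (by simp)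
  rw [← hr0] at hD1 hD2 hD3
  simp only [List.nil_append] at hD2 hD3
  -- keys of runs0 are exactly the values of x2
  have hmapg : (byval2.map (fun j => PySem.List.pyGetD x2 j 0)).Perm x2 := by
    have h1 : (byval2.map (fun j => PySem.List.pyGetD x2 j 0)).Perm
        ((PySem.List.pyRange 0 (PySem.List.len x2)).map (fun j => PySem.List.pyGetD x2 j 0)) :=
      hperm2.map _
    rwa [PySem.List.map_pyGetD_pyRange_zero x2 0] at h1
  have hkeys : ∀ v : Int, v ∈ runs0.map Prod.fst ↔ v ∈ x2 := by
    intro v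
    rw [hD2 v, hmapg.mem_iff]
  -- each run's index is the first occurrence of its value in x2
  have hidx : ∀ r ∈ runs0, r.2 = (((PySem.List.index? x2 r.1).getD 0 : Nat) : Int) := by
    intro r hr
    obtain ⟨hmem, hval, hmin⟩ := hD3 r hr
    have hrange : (0 : Int) ≤ r.2 ∧ r.2 < PySem.List.len x2 := by
      have := hperm2.mem_iff.mp hmem
      exact PySem.List.mem_pyRange_one.mp this
    have hlen : r.2.toNat < x2.length := by
      simp only [PySem.List.len_eq] at hrange; omega
    have hget : x2[r.2.toNat] = r.1 := by
      rw [← PySem.List.pyGetD_eq_getElem x2 0 hrange.1 (by simpa using hrange.2)]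
      exact hval
    have hrx : r.1 ∈ x2 := hget ▸ List.getElem_mem hlen
    obtain ⟨k0, hk0⟩ := Option.isSome_iff_exists.mp ((PySem.List.index?_isSome_iff x2 r.1).mpr hrx)
    obtain ⟨hk0l, hk0v, hk0min⟩ := PySem.List.getElem_of_index?_eq_some hk0
    have h1 : k0 ≤ r.2.toNat := by
      by_contra hcon
      exact hk0min r.2.toNat (by omega) hget
    have h2 : r.2 ≤ (k0 : Int) := by
      apply hmin (k0 : Int)
      · apply hperm2.mem_iff.mpr
        apply PySem.List.mem_pyRange_one.mpr
        constructor
        · exact Int.natCast_nonneg k0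
        · simp only [PySem.List.len_eq]; exact_mod_cast hk0l
      · rw [PySem.List.pyGetD_eq_getElem x2 0 (Int.natCast_nonneg k0) (by exact_mod_cast hk0l)]
        simpa using hk0v
    have : r.2 = (k0 : Int) := by omega
    rw [this, hk0]
    rfl
  -- the merge loop over the value-sorted x1 indices
  have hpair1 := PySem.List.sorted_pairwise (PySem.List.pyRange 0 (PySem.List.len x1))
      (fun i => PySem.List.pyGetD x1 i 0)
  have hperm1 := PySem.List.sorted_perm (PySem.List.pyRange 0 (PySem.List.len x1))
      (fun i => PySem.List.pyGetD x1 i 0) false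
  set order1 := PySem.List.sorted (PySem.List.pyRange 0 (PySem.List.len x1))
      (fun i => PySem.List.pyGetD x1 i 0) with ho1
  have hmerge := merge_fold x1 y1 y2 runs0 hD1 order1 0 [] hpair1 (Nat.zero_le _)
      (fun q hq => absurd hq (Nat.not_lt_zero q))
  simp only [List.nil_append] at hmerge
  -- the canonical matched list, indexed over enumerate x1
  set psi := fun p : Int × Int => (runs0.find? (fun r => r.1 == p.2)).map
      (fun r => (p.1, p.2, PySem.List.pyGetD y1 p.1 0 - PySem.List.pyGetD y2 r.2 0)) with hpsi
  set L := (PySem.List.enumerate x1).filterMap psi with hLdef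
  have hL1 : (PySem.List.pyRange 0 (PySem.List.len x1)).filterMap (phi x1 y1 y2 runs0) = L := by
    rw [hLdef, PySem.List.enumerate_eq_map_pyRange x1 0, List.filterMap_map]
    rfl
  have hpermL : (order1.filterMap (phi x1 y1 y2 runs0)).Perm L := by
    rw [← hL1]
    exact hperm1.filterMap _
  have hLpair : L.Pairwise (fun a b => a.1 < b.1) := by
    rw [hLdef]
    refine List.Pairwise.filterMap psi ?_ (PySem.List.pairwise_lt_enumerate x1 0)
    intro a a' hR b hb b' hb'
    have hb1 : b.1 = a.1 := by
      rw [hpsi] at hb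
      rcases Option.map_eq_some_iff.mp hb with ⟨r, _, rfl⟩
      rfl
    have hb1' : b'.1 = a'.1 := by
      rw [hpsi] at hb'
      rcases Option.map_eq_some_iff.mp hb' with ⟨r, _, rfl⟩
      rfl
    rw [hb1, hb1']
    exact hR
  have hsorted : PySem.List.sorted (order1.foldl (mergeStep x1 y1 y2 runs0) (0, [])).2
      (fun m => m.1) = L := by
    rw [hmerge]
    exact PySem.List.sorted_eq_of_perm_of_pairwise_lt _ L _ hpermL.symm hLpair
  -- L is the canonical list of A
  have hLA : L = canonA x1 y1 x2 y2 := by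
    rw [hLdef, canonA]
    apply List.filterMap_congr
    intro p _
    by_cases hp2 : p.2 ∈ x2
    · have hex : ∃ r ∈ runs0, (fun r : Int × Int => r.1 == p.2) r = true := by
        rcases List.mem_map.mp ((hkeys p.2).mpr hp2) with ⟨r, hr, hr1⟩
        exact ⟨r, hr, by simp [hr1]⟩
      obtain ⟨r, hfind⟩ := Option.isSome_iff_exists.mp (List.find?_isSome.mpr hex)
      have hr1 : r.1 = p.2 := by simpa using List.find?_some hfind
      have hrmem := List.mem_of_find?_eq_some hfind
      rw [hpsi]
      simp only [hfind, Option.map_some, if_pos hp2]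
      rw [hidx r hrmem, hr1]
    · have hfind : runs0.find? (fun r => r.1 == p.2) = none := by
        rw [List.find?_eq_none]
        intro r hr
        simp only [beq_iff_eq]
        intro hc
        exact hp2 (hc ▸ (hkeys r.1).mp (List.mem_map.mpr ⟨r, hr, rfl⟩))
      rw [hpsi]
      simp only [hfind, Option.map_none, if_neg hp2]
  show [(PySem.List.sorted (order1.foldl (mergeStep x1 y1 y2 runs0) (0, [])).2
          (fun m => m.1)).map (fun m => m.2.1),
        (PySem.List.sorted (order1.foldl (mergeStep x1 y1 y2 runs0) (0, [])).2
          (fun m => m.1)).map (fun m => m.2.2)] = _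
  rw [hsorted, hLA]

-- ===== VERDICT (by name: the statement is the Claim_ definition above) =====
theorem subtract_spec : Claim_equal_subtract := by
  intro x1 y1 x2 y2 _ _
  unfold Spec_subtract
  rw [subtract_eq_canon, alt_eq_canon]
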